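-- pv_equiv track=rewrite | github.com/MikPoik/modal-ai-companion | src/handlers/chat_handler.py | filter_messages_for_context
-- ===== SOURCE A (Python) =====
-- from typing import List, Dict, Optional
--
-- def filter_messages_for_context(messages: List[Dict], max_context_size: int = 4096) -> List[Dict]:
--     """
--     Filter messages to fit within context size while preserving system message and chronological order.
--     """
--     def estimate_tokens(message: Dict) -> int:
--         """Estimate tokens in a message using 4 chars/token ratio."""
--         content = message.get('content', '')
--         return len(content) // 4
--     if not messages:
--         return []
--     # Extract system message
--     system_message = next((msg for msg in messages if msg.get('role') == 'system'), None)
--     filtered_messages = [system_message] if system_message else []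
--     # Get non-system messages
--     conversation = [msg for msg in messages if msg.get('role') != 'system']
--     # Calculate current token count starting with system message
--     current_tokens = estimate_tokens(system_message) if system_message else 0
--     # Add messages from newest to oldest until we hit token limit
--     for message in reversed(conversation):
--         message_tokens = estimate_tokens(message)
--         if current_tokens + message_tokens <= max_context_size:
--             filtered_messages.append(message)
--             current_tokens += message_tokens
--         else:
--             break
--     # Restore message order: system first, then chronological
--     return ([msg for msg in filtered_messages if msg.get('role') == 'system'] +
--             list(reversed([msg for msg in filtered_messages if msg.get('role') != 'system'])))
-- ===== SOURCE B (Python) =====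
-- from typing import List, Dict, Optional
--
-- def filter_messages_for_context(messages: List[Dict], max_context_size: int = 4096) -> List[Dict]:
--     """
--     Filter messages to fit within context size while preserving system message and chronological order.
--     Strategy: start from the FULL conversation budget and evict the OLDEST messages
--     while the total exceeds the limit; no reversing is needed.
--     """
--     def estimate_tokens(message: Dict) -> int:
--         content = message.get('content', '')
--         return len(content) // 4
--     if not messages:
--         return []
--     system_message = next((msg for msg in messages if msg.get('role') == 'system'), None)
--     conversation = [msg for msg in messages if msg.get('role') != 'system']
--     total = (estimate_tokens(system_message) if system_message else 0) \
--             + sum(estimate_tokens(msg) for msg in conversation)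
--     i = 0
--     while i < len(conversation) and total > max_context_size:
--         total -= estimate_tokens(conversation[i])
--         i += 1
--     head = [system_message] if system_message else []
--     return head + conversation[i:]
-- ===== Notes on version B (the rewrite author's own statement) =====
-- stated objective: alternative
-- what changed: Instead of re-adding messages newest-to-oldest up to the budget and then reversing, B computes the full token total once and evicts messages from the oldest end while the total exceeds the budget, returning the surviving conversation in place (no reversing).
import Mathlib
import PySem

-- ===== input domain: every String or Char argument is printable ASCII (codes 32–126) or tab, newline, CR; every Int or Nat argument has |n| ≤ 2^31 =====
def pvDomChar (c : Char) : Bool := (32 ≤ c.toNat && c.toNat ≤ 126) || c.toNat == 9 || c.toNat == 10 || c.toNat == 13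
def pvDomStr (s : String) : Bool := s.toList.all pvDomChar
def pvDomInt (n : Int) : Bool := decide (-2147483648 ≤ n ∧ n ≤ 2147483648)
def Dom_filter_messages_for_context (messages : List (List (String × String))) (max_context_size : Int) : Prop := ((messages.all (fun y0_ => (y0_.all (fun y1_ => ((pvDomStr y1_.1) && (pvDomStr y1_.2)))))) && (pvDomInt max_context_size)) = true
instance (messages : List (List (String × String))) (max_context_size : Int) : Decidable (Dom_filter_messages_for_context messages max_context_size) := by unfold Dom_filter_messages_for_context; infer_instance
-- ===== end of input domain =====

-- B evicts from the oldest end of the conversation until the precomputed token total fits,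
-- instead of A's newest-to-oldest re-adding pass followed by reversing; return values proved equal.

-- ===== PORT A =====
-- estimate_tokens: len(message.get('content', '')) // 4
def fmcTok (m : List (String × String)) : Int :=
  PySem.Int.floordiv (PySem.Str.len ((PySem.Dict.mk m).getD "content" "")) 4

-- msg.get('role') == 'system'
def fmcIsSys (m : List (String × String)) : Bool :=
  (PySem.Dict.mk m).get? "role" == some "system"

-- the 'for message in reversed(conversation): … else: break' loop, accumulating filtered_messages
def fmcLoopA (mx : Int) : List (List (String × String)) → List (List (String × String)) → Int → List (List (String × String))
  | [], acc, _ => acc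
  | m :: rest, acc, cur =>
      if cur + fmcTok m ≤ mx then fmcLoopA mx rest (acc ++ [m]) (cur + fmcTok m)
      else acc

def filter_messages_for_context (messages : List (List (String × String))) (max_context_size : Int) : List (List (String × String)) :=
  if messages = [] then []
  else
    -- a dict found by 'role == system' contains the key "role", hence is nonempty: Python truthiness = isSome
    let system_message := messages.find? fmcIsSys
    let filtered0 : List (List (String × String)) := match system_message with | some s => [s] | none => []
    let conversation := messages.filter (fun m => !fmcIsSys m)
    let cur0 : Int := match system_message with | some s => fmcTok s | none => 0
    let filtered := fmcLoopA max_context_size conversation.reverse filtered0 cur0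
    filtered.filter fmcIsSys ++ (filtered.filter (fun m => !fmcIsSys m)).reverse

-- ===== PORT B =====
-- the 'while i < len(conversation) and total > max_context_size' eviction loop; returns conversation[i:]
def fmcDrop (mx : Int) : List (List (String × String)) → Int → List (List (String × String))
  | [], _ => []
  | m :: rest, total =>
      if total > mx then fmcDrop mx rest (total - fmcTok m) else m :: rest

def filter_messages_for_context_alt (messages : List (List (String × String))) (max_context_size : Int) : List (List (String × String)) :=
  if messages = [] then []
  else
    let system_message := messages.find? fmcIsSys
    let conversation := messages.filter (fun m => !fmcIsSys m)
    let total : Int := (match system_message with | some s => fmcTok s | none => 0) + (conversation.map fmcTok).sum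
    let head : List (List (String × String)) := match system_message with | some s => [s] | none => []
    head ++ fmcDrop max_context_size conversation total

-- ===== PRECONDITION & SPEC =====
def Spec_filter_messages_for_context (messages : List (List (String × String))) (max_context_size : Int) (out : List (List (String × String))) : Prop := out = filter_messages_for_context_alt messages max_context_size
instance (messages : List (List (String × String))) (max_context_size : Int) (out : List (List (String × String))) : Decidable (Spec_filter_messages_for_context messages max_context_size out) := by unfold Spec_filter_messages_for_context; infer_instance

-- ===== CLAIM (what is proved, stated in full; the proofs are below) =====
def Claim_equal_filter_messages_for_context : Prop := ∀ (messages : List (List (String × String))) (max_context_size : Int), Dom_filter_messages_for_context messages max_context_size → Spec_filter_messages_for_context messages max_context_size (filter_messages_for_context messages max_context_size)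

-- ===== LEMMAS AND PROOFS =====

theorem fmcTok_nonneg (m : List (String × String)) : 0 ≤ fmcTok m := by
  unfold fmcTok
  rw [PySem.Int.floordiv_eq_ediv_of_pos (by norm_num)]
  exact Int.ediv_nonneg (by simp [PySem.Str.len_eq]) (by norm_num)

theorem fmcSum_nonneg (l : List (List (String × String))) : 0 ≤ (l.map fmcTok).sum := by
  induction l with
  | nil => simp
  | cons x xs ih => simp only [List.map_cons, List.sum_cons]; have := fmcTok_nonneg x; omega

theorem fmcLoopA_acc (mx : Int) (l : List (List (String × String)))
    (acc : List (List (String × String))) (cur : Int) :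
    fmcLoopA mx l acc cur = acc ++ fmcLoopA mx l [] cur := by
  induction l generalizing acc cur with
  | nil => simp [fmcLoopA]
  | cons m rest ih =>
      simp only [fmcLoopA]
      split
      · rw [ih (acc ++ [m]), ih ([] ++ [m])]; simp
      · simp

theorem fmcLoopA_mem (mx : Int) (l : List (List (String × String))) (cur : Int)
    (x : List (String × String)) (hx : x ∈ fmcLoopA mx l [] cur) : x ∈ l := by
  induction l generalizing cur with
  | nil => simp [fmcLoopA] at hx
  | cons m rest ih =>
      simp only [fmcLoopA] at hx
      split at hx
      · rw [fmcLoopA_acc] at hx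
        simp at hx
        rcases hx with h | h
        · simp [h]
        · exact List.mem_cons_of_mem _ (ih _ h)
      · simp at hx

theorem fmcLoopA_all (mx : Int) (l : List (List (String × String))) (cur : Int)
    (h : cur + (l.map fmcTok).sum ≤ mx) : fmcLoopA mx l [] cur = l := by
  induction l generalizing cur with
  | nil => rfl
  | cons m rest ih =>
      simp only [List.map_cons, List.sum_cons] at h
      have hs := fmcSum_nonneg rest
      simp only [fmcLoopA, if_pos (show cur + fmcTok m ≤ mx by omega)]
      rw [fmcLoopA_acc, ih (cur + fmcTok m) (by omega)]
      rfl

theorem fmcLoopA_last (mx : Int) (l : List (List (String × String)))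
    (m : List (String × String)) (cur : Int)
    (h : mx < cur + (l.map fmcTok).sum + fmcTok m) :
    fmcLoopA mx (l ++ [m]) [] cur = fmcLoopA mx l [] cur := by
  induction l generalizing cur with
  | nil =>
      simp only [List.map_nil, List.sum_nil] at h
      simp [fmcLoopA, show ¬ (cur + fmcTok m ≤ mx) by omega]
  | cons x rest ih =>
      simp only [List.map_cons, List.sum_cons] at h
      simp only [List.cons_append, fmcLoopA]
      split
      · rw [fmcLoopA_acc mx (rest ++ [m]), fmcLoopA_acc mx rest,
            ih (cur + fmcTok x) (by omega)]
      · rfl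

theorem fmcLoopA_eq_fmcDrop (mx : Int) (c : List (List (String × String))) (cur : Int) :
    (fmcLoopA mx c.reverse [] cur).reverse = fmcDrop mx c (cur + (c.map fmcTok).sum) := by
  induction c generalizing cur with
  | nil => rfl
  | cons m rest ih =>
      simp only [List.reverse_cons, List.map_cons, List.sum_cons, fmcDrop]
      by_cases h : cur + (fmcTok m + (rest.map fmcTok).sum) ≤ mx
      · rw [if_neg (by omega)]
        rw [fmcLoopA_all mx (rest.reverse ++ [m]) cur
            (by simp only [List.map_append, List.sum_append, List.map_reverse,
                           List.sum_reverse]; simp; omega)]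
        simp
      · rw [if_pos (by omega)]
        rw [fmcLoopA_last mx rest.reverse m cur
            (by rw [List.map_reverse, List.sum_reverse]; omega)]
        rw [ih cur]
        congr 1
        omega

theorem fmc_main (messages : List (List (String × String))) (mx : Int) :
    filter_messages_for_context messages mx = filter_messages_for_context_alt messages mx := by
  unfold filter_messages_for_context filter_messages_for_context_alt
  by_cases hm : messages = []
  · simp [hm]
  · simp only [if_neg hm]
    set sys := messages.find? fmcIsSys with hsys
    set conv := messages.filter (fun m => !fmcIsSys m) with hconv
    have hconvmem : ∀ x ∈ conv, fmcIsSys x = false := by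
      intro x hx
      have := List.of_mem_filter hx
      simpa using this
    -- the kept part of the loop consists of conversation messages only
    have hkeep : ∀ cur, (fmcLoopA mx conv.reverse [] cur).filter fmcIsSys = [] ∧
        (fmcLoopA mx conv.reverse [] cur).filter (fun m => !fmcIsSys m)
          = fmcLoopA mx conv.reverse [] cur := by
      intro cur
      constructor
      · rw [List.filter_eq_nil_iff]
        intro x hx
        have hxc : x ∈ conv := by
          have := fmcLoopA_mem mx conv.reverse cur x hx
          simpa using this
        simp [hconvmem x hxc]
      · rw [List.filter_eq_self]
        intro x hx
        have hxc : x ∈ conv := by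
          have := fmcLoopA_mem mx conv.reverse cur x hx
          simpa using this
        simp [hconvmem x hxc]
    cases hfind : sys with
    | none =>
        rw [fmcLoopA_acc]
        simp only [List.nil_append]
        rw [(hkeep 0).1, (hkeep 0).2]
        simpa using fmcLoopA_eq_fmcDrop mx conv 0
    | some s =>
        have hs : fmcIsSys s = true := by
          have := List.find?_some (hsys ▸ hfind)
          exact this
        rw [fmcLoopA_acc]
        rw [List.filter_append, List.filter_append,
            (hkeep (fmcTok s)).1, (hkeep (fmcTok s)).2]
        simp [hs, fmcLoopA_eq_fmcDrop mx conv (fmcTok s)]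

-- ===== VERDICT (by name: the statement is the Claim_ definition above) =====
theorem filter_messages_for_context_spec : Claim_equal_filter_messages_for_context := by
  intro messages mx _
  unfold Spec_filter_messages_for_context
  exact fmc_main messages mx
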